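-- pv_equiv track=rewrite | github.com/mobinasatt/tip_hub_backend | extensions/utils.py | persian_number
-- ===== SOURCE A (Python) =====
-- def persian_number(t_str):
--     numbers = {
--         "0": "۰",
--         "1": "۱",
--         "2": "۲",
--         "3": "۳",
--         "4": "۴",
--         "5": "۵",
--         "6": "۶",
--         "7": "۷",
--         "8": "۸",
--         "9": "۹",
--     }
--     for e, p in numbers.items():
--         t_str = t_str.replace(e, p)
--     return t_str
-- ===== SOURCE B (Python) =====
-- def persian_number(t_str):
--     numbers = {
--         "0": "۰",
--         "1": "۱",
--         "2": "۲",
--         "3": "۳",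
--         "4": "۴",
--         "5": "۵",
--         "6": "۶",
--         "7": "۷",
--         "8": "۸",
--         "9": "۹",
--     }
--     return "".join(numbers.get(ch, ch) for ch in t_str)
-- ===== Notes on version B (the rewrite author's own statement) =====
-- stated objective: idiomatic
-- what changed: Replaced A's ten sequential full-string .replace passes (one per digit) with a single pass over the characters that joins a per-character dict lookup (numbers.get(ch, ch)), leaving non-digits unchanged.
import Mathlib
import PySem

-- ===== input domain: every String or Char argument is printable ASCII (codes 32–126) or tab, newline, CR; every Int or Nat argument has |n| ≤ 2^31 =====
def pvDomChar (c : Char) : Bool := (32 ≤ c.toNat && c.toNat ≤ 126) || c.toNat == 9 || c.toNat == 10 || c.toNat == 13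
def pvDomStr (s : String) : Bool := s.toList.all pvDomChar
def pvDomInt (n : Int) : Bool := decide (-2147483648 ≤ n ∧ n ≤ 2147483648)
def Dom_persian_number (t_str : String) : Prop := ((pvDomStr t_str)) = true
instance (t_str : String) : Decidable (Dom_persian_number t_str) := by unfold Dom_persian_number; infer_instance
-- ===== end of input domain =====

-- B replaces A's ten full-string .replace passes by a single pass over the characters
-- with one dict lookup per character (objective: idiomatic single pass; same results).


-- ===== PORT A =====
-- A's dict literal of ASCII → Persian digit strings
def pnNumbersA : PySem.Dict String String :=
  ⟨[("0","۰"),("1","۱"),("2","۲"),("3","۳"),("4","۴"),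
    ("5","۵"),("6","۶"),("7","۷"),("8","۸"),("9","۹")]⟩

-- for e, p in numbers.items(): t_str = t_str.replace(e, p)
def persian_number (t_str : String) : String :=
  pnNumbersA.items.foldl (fun t ep => PySem.Str.replace t ep.1 ep.2) t_str

-- ===== PORT B =====
-- B's dict; every key and value is a one-character string, kept here as Char
def pnNumbersB : PySem.Dict Char Char :=
  ⟨[('0','۰'),('1','۱'),('2','۲'),('3','۳'),('4','۴'),
    ('5','۵'),('6','۶'),('7','۷'),('8','۸'),('9','۹')]⟩

-- "".join(numbers.get(ch, ch) for ch in t_str); exact because every joined piece is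
-- a single character, so the join of the per-character lookups is String.ofList of the map
def persian_number_alt (t_str : String) : String :=
  String.ofList (t_str.toList.map (fun ch => PySem.Dict.getD pnNumbersB ch ch))

-- ===== PRECONDITION & SPEC =====
def Spec_persian_number (t_str : String) (out : String) : Prop := out = persian_number_alt t_str
instance (t_str : String) (out : String) : Decidable (Spec_persian_number t_str out) := by unfold Spec_persian_number; infer_instance

-- ===== CLAIM (what is proved, stated in full; the proofs are below) =====
def Claim_equal_persian_number : Prop := ∀ (t_str : String), Dom_persian_number t_str → Spec_persian_number t_str (persian_number t_str)

-- ===== LEMMAS AND PROOFS =====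

-- replacing a single character e by p is a per-character map
theorem replace_go_single (e p : Char) :
    ∀ (fuel : Nat) (l acc : List Char), l.length ≤ fuel →
      PySem.Chars.replace.go [e] [p] fuel l acc
        = acc.reverse ++ l.map (fun c => if c == e then p else c) := by
  intro fuel
  induction fuel with
  | zero =>
    intro l acc h
    have : l = [] := List.length_eq_zero_iff.mp (Nat.le_zero.mp h)
    subst this; simp [PySem.Chars.replace.go]
  | succ n ih =>
    intro l acc h
    cases l with
    | nil => simp [PySem.Chars.replace.go]
    | cons c t =>
      by_cases hc : c = e
      · subst hc
        have hpre : [c].isPrefixOf (c :: t) = true := by simp [List.isPrefixOf]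
        rw [PySem.Chars.replace.go, if_pos hpre]
        show PySem.Chars.replace.go [c] [p] n t ([p].reverse ++ acc)
              = acc.reverse ++ List.map (fun c' => if c' == c then p else c') (c :: t)
        rw [ih t _ (by simpa using Nat.le_of_succ_le_succ h)]
        simp
      · have hpre : [e].isPrefixOf (c :: t) = false := by
          simp [List.isPrefixOf]; exact fun h' => hc h'.symm
        rw [PySem.Chars.replace.go, if_neg (by simp [hpre])]
        rw [ih t _ (by simpa using Nat.le_of_succ_le_succ h)]
        simp [hc]

theorem replace_single (s : List Char) (e p : Char) :
    PySem.Chars.replace s [e] [p] = s.map (fun c => if c == e then p else c) := by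
  rw [PySem.Chars.replace]
  simp [replace_go_single e p s.length s [] (le_refl _)]

-- the ten substitutions applied in A's order agree, character by character, with B's lookup
theorem pn_char_step (c : Char) :
    (fun c => if c == '9' then '۹' else c)
      ((fun c => if c == '8' then '۸' else c)
        ((fun c => if c == '7' then '۷' else c)
          ((fun c => if c == '6' then '۶' else c)
            ((fun c => if c == '5' then '۵' else c)
              ((fun c => if c == '4' then '۴' else c)
                ((fun c => if c == '3' then '۳' else c)
                  ((fun c => if c == '2' then '۲' else c)
                    ((fun c => if c == '1' then '۱' else c)
                      ((fun c => if c == '0' then '۰' else c) c)))))))))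
      = PySem.Dict.getD pnNumbersB c c := by
  by_cases h0 : c = '0'; · subst h0; decide
  by_cases h1 : c = '1'; · subst h1; decide
  by_cases h2 : c = '2'; · subst h2; decide
  by_cases h3 : c = '3'; · subst h3; decide
  by_cases h4 : c = '4'; · subst h4; decide
  by_cases h5 : c = '5'; · subst h5; decide
  by_cases h6 : c = '6'; · subst h6; decide
  by_cases h7 : c = '7'; · subst h7; decide
  by_cases h8 : c = '8'; · subst h8; decide
  by_cases h9 : c = '9'; · subst h9; decide
  have b0 : ('0' == c) = false := beq_eq_false_iff_ne.mpr (Ne.symm h0)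
  have b1 : ('1' == c) = false := beq_eq_false_iff_ne.mpr (Ne.symm h1)
  have b2 : ('2' == c) = false := beq_eq_false_iff_ne.mpr (Ne.symm h2)
  have b3 : ('3' == c) = false := beq_eq_false_iff_ne.mpr (Ne.symm h3)
  have b4 : ('4' == c) = false := beq_eq_false_iff_ne.mpr (Ne.symm h4)
  have b5 : ('5' == c) = false := beq_eq_false_iff_ne.mpr (Ne.symm h5)
  have b6 : ('6' == c) = false := beq_eq_false_iff_ne.mpr (Ne.symm h6)
  have b7 : ('7' == c) = false := beq_eq_false_iff_ne.mpr (Ne.symm h7)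
  have b8 : ('8' == c) = false := beq_eq_false_iff_ne.mpr (Ne.symm h8)
  have b9 : ('9' == c) = false := beq_eq_false_iff_ne.mpr (Ne.symm h9)
  simp [PySem.Dict.getD, PySem.Dict.get?, pnNumbersB, List.find?,
        h0, h1, h2, h3, h4, h5, h6, h7, h8, h9,
        b0, b1, b2, b3, b4, b5, b6, b7, b8, b9]


theorem maps_eq (cs : List Char) :
    List.map (fun c => if c == '9' then '۹' else c)
      (List.map (fun c => if c == '8' then '۸' else c)
        (List.map (fun c => if c == '7' then '۷' else c)
          (List.map (fun c => if c == '6' then '۶' else c)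
            (List.map (fun c => if c == '5' then '۵' else c)
              (List.map (fun c => if c == '4' then '۴' else c)
                (List.map (fun c => if c == '3' then '۳' else c)
                  (List.map (fun c => if c == '2' then '۲' else c)
                    (List.map (fun c => if c == '1' then '۱' else c)
                      (List.map (fun c => if c == '0' then '۰' else c) cs)))))))))
      = cs.map (fun ch => PySem.Dict.getD pnNumbersB ch ch) := by
  induction cs with
  | nil => rfl
  | cons c t ih =>
    simp only [List.map_cons]
    exact congrArg₂ List.cons (pn_char_step c) ih

set_option maxHeartbeats 1600000 in
theorem persian_number_spec : Claim_equal_persian_number := by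
  intro t_str _
  unfold Spec_persian_number persian_number persian_number_alt pnNumbersA
  rw [← String.toList_inj]
  simp only [PySem.Dict.items, List.foldl, PySem.Str.toList_replace,
    String.toList_ofList]
  simp only [(show ("0":String).toList = ['0'] from by decide), (show ("1":String).toList = ['1'] from by decide),
    (show ("2":String).toList = ['2'] from by decide), (show ("3":String).toList = ['3'] from by decide),
    (show ("4":String).toList = ['4'] from by decide), (show ("5":String).toList = ['5'] from by decide),
    (show ("6":String).toList = ['6'] from by decide), (show ("7":String).toList = ['7'] from by decide),
    (show ("8":String).toList = ['8'] from by decide), (show ("9":String).toList = ['9'] from by decide),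
    (show ("۰":String).toList = ['۰'] from by decide), (show ("۱":String).toList = ['۱'] from by decide),
    (show ("۲":String).toList = ['۲'] from by decide), (show ("۳":String).toList = ['۳'] from by decide),
    (show ("۴":String).toList = ['۴'] from by decide), (show ("۵":String).toList = ['۵'] from by decide),
    (show ("۶":String).toList = ['۶'] from by decide), (show ("۷":String).toList = ['۷'] from by decide),
    (show ("۸":String).toList = ['۸'] from by decide), (show ("۹":String).toList = ['۹'] from by decide)]
  simp only [replace_single]
  exact maps_eq t_str.toList
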